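-- pv_equiv track=rewrite | github.com/decorouz/practices-of-the-python-pro | chapter02/decomposition.py | introduce
-- ===== SOURCE A (Python) =====
-- def introduce(title, names):
--     message = f"{title}: "
--
--     for index, name in enumerate(names):
--         if index > 0:
--             message += ", "
--         if index == len(names) - 1:
--             message += "and "
--         message += name
--     return message
-- ===== SOURCE B (Python) =====
-- def introduce(title, names):
--     parts = list(names)
--     if not parts:
--         return f"{title}: "
--     return f"{title}: " + ", ".join(parts[:-1] + ["and " + parts[-1]])
-- ===== Notes on version B (the rewrite author's own statement) =====
-- stated objective: simpler
-- what changed: Replaces the per-element loop with its two index-based branches by slice-based list construction (parts[:-1] + ['and ' + parts[-1]]) and a single ', '.join, with an early return for the empty list.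
import Mathlib
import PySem

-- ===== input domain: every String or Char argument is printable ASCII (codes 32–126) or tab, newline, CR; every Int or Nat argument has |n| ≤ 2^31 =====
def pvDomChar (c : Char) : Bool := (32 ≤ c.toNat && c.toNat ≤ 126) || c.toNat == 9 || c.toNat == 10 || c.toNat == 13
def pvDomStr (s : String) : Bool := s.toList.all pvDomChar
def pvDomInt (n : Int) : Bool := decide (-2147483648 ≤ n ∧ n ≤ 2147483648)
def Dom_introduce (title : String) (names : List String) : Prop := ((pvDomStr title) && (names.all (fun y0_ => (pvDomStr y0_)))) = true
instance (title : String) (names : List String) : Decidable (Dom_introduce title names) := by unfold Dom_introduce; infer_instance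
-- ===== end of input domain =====

-- B replaces A's per-element loop (two index-based branches) by joining parts[:-1] + ["and " + parts[-1]] with ", "; simpler, same output.

-- ===== PORT A =====
-- A's for-loop over enumerate(names): i is the running index, msg the accumulated message, n = len(names)
def introduceLoop (n : Nat) (i : Nat) (msg : String) : List String → String
  | [] => msg
  | name :: rest =>
      introduceLoop n (i + 1)
        ((msg ++ (if 0 < i then ", " else "") ++ (if i = n - 1 then "and " else "")) ++ name) rest

def introduce (title : String) (names : List String) : String :=
  introduceLoop names.length 0 (title ++ ": ") names

-- ===== PORT B =====
def introduce_alt (title : String) (names : List String) : String :=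
  match names with
  | [] => title ++ ": "
  | x :: xs =>
      title ++ ": " ++
        PySem.Str.join ", " ((x :: xs).dropLast ++ ["and " ++ (x :: xs).getLast (by simp)])

-- ===== PRECONDITION & SPEC =====
def Spec_introduce (title : String) (names : List String) (out : String) : Prop := out = introduce_alt title names
instance (title : String) (names : List String) (out : String) : Decidable (Spec_introduce title names out) := by unfold Spec_introduce; infer_instance

-- ===== CLAIM (what is proved, stated in full; the proofs are below) =====
def Claim_equal_introduce : Prop := ∀ (title : String) (names : List String), Dom_introduce title names → Spec_introduce title names (introduce title names)

-- ===== LEMMAS AND PROOFS =====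

-- B's joined body for a nonempty list x :: xs
def pvBody (x : String) (xs : List String) : String :=
  PySem.Str.join ", " ((x :: xs).dropLast ++ ["and " ++ (x :: xs).getLast (by simp)])

theorem pvBody_single (x : String) : pvBody x [] = "and " ++ x := by
  apply String.toList_inj.mp
  simp [pvBody, PySem.Str.toList_join, PySem.Chars.join_singleton]

theorem pvBody_cons (x y : String) (ys : List String) :
    pvBody x (y :: ys) = x ++ ", " ++ pvBody y ys := by
  apply String.toList_inj.mp
  cases ys with
  | nil =>
      simp [pvBody, PySem.Str.toList_join, PySem.Chars.join_cons_cons,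
        PySem.Chars.join_singleton, String.toList_append]
  | cons z zs =>
      simp only [pvBody, List.dropLast, List.getLast, List.cons_append, List.map_cons,
        PySem.Str.toList_join, PySem.Chars.join_cons_cons, String.toList_append]

-- one step of A's loop (the for-body), used to unfold exactly one iteration
theorem introduceLoop_cons (n i : Nat) (msg name : String) (rest : List String) :
    introduceLoop n i msg (name :: rest)
      = introduceLoop n (i + 1)
          ((msg ++ (if 0 < i then ", " else "") ++ (if i = n - 1 then "and " else "")) ++ name) rest := rfl

-- the tail of A's loop: indices ≥ 1 over a nonempty remainder
theorem introduceLoop_tail (xs : List String) :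
    ∀ (x : String) (i : Nat) (msg : String),
      introduceLoop ((x :: xs).length + i + 1) (i + 1) msg (x :: xs) = msg ++ ", " ++ pvBody x xs := by
  induction xs with
  | nil =>
      intro x i msg
      rw [introduceLoop_cons, if_pos (Nat.succ_pos i),
        if_pos (by simp; omega : i + 1 = ([x].length + i + 1) - 1)]
      show (msg ++ ", " ++ "and ") ++ x = msg ++ ", " ++ pvBody x []
      rw [pvBody_single]
      apply String.toList_inj.mp
      simp [String.toList_append]
  | cons y ys ih =>
      intro x i msg
      rw [introduceLoop_cons, if_pos (Nat.succ_pos i),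
        if_neg (by simp; omega : ¬ (i + 1 = ((x :: y :: ys).length + i + 1) - 1))]
      have hn : (x :: y :: ys).length + i + 1 = (y :: ys).length + (i + 1) + 1 := by
        simp; omega
      rw [hn, ih y (i + 1)]
      rw [pvBody_cons]
      apply String.toList_inj.mp
      simp [String.toList_append]

theorem introduce_eq (title : String) (names : List String) :
    introduce title names = introduce_alt title names := by
  cases names with
  | nil => rfl
  | cons x xs =>
      cases xs with
      | nil =>
          show introduceLoop 1 0 (title ++ ": ") [x] = title ++ ": " ++ pvBody x []
          rw [introduceLoop_cons, if_neg (lt_irrefl 0), if_pos (by simp : 0 = 1 - 1)]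
          show (title ++ ": " ++ "" ++ "and ") ++ x = _
          rw [pvBody_single]
          apply String.toList_inj.mp
          simp [String.toList_append]
      | cons y ys =>
          show introduceLoop (x :: y :: ys).length 0 (title ++ ": ") (x :: y :: ys)
              = title ++ ": " ++ pvBody x (y :: ys)
          rw [introduceLoop_cons, if_neg (lt_irrefl 0),
            if_neg (by simp : ¬ (0 = (x :: y :: ys).length - 1))]
          have hn : (x :: y :: ys).length = (y :: ys).length + 0 + 1 := by simp
          rw [hn, introduceLoop_tail ys y 0]
          rw [pvBody_cons]
          apply String.toList_inj.mp
          simp [String.toList_append]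

-- ===== VERDICT (by name: the statement is the Claim_ definition above) =====
theorem introduce_spec : Claim_equal_introduce := by
  intro title names _
  exact introduce_eq title names
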